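-- pv_equiv track=rewrite | github.com/angga2911/cs224u-wiki-generator | andys_files/relatedness.py | findMaxN
-- ===== SOURCE A (Python) =====
-- def findMaxN(n, someList):
--         result = [-1]*n
--         for i in range(0, len(someList)):
--                 #if someList[i] > result[-1]:
--                         #result[-1] = someList[i]
--                         #result = sorted(result, cmp=reverse_numeric)
--                 smallest = min(result)
--                 minIndex = result.index(min(result))
--                 if someList[i] > smallest:
--                         result[minIndex] = someList[i]
--
--         return result
-- ===== SOURCE B (Python) =====
-- def findMaxN(n, someList):
--     """Keep the n largest values seen so far (slots start at -1); each new
--     value replaces the current smallest value, leftmost slot on ties."""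
--     result = [-1] * n
--     # (value, slot) pairs kept sorted ascending, so order[0] is always the
--     # smallest value with the leftmost slot: one comparison decides whether
--     # a new value is kept, one sorted insertion records it.  Kept values
--     # tend to be large, so we search the insertion point from the right.
--     order = [(-1, j) for j in range(n)]
--     for x in someList:
--         smallest, j = order[0]
--         if x > smallest:
--             result[j] = x
--             order.pop(0)
--             k = len(order)
--             while k > 0 and order[k - 1] > (x, j):
--                 k -= 1
--             order.insert(k, (x, j))
--     return result
-- ===== Notes on version B (the rewrite author's own statement) =====
-- stated objective: faster
-- what changed: B mutates the result list in place guided by a side list of (value, slot) pairs kept sorted ascending, so each element costs one comparison against the head, plus one right-to-left sorted insertion when it is kept, instead of A's three full scans (min, min, index) of the result per element; Pre_ excludes n <= 0 with nonempty someList, where A raises ValueError (min of []) and B raises IndexError.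
import Mathlib
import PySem

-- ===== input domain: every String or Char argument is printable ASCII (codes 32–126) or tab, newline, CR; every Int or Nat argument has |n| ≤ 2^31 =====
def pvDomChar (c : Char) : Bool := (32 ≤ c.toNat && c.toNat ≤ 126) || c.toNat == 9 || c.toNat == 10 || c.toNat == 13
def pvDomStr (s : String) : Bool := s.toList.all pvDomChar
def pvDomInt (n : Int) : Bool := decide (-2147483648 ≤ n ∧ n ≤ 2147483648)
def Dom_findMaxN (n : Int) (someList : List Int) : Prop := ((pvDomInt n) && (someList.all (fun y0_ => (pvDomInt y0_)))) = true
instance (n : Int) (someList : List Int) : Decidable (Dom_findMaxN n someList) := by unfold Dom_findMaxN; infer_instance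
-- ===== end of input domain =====

-- B keeps the slots' (value, slot) pairs in one ascending sorted side list, so each element
-- needs one comparison against its head (plus a sorted insertion when the element is kept)
-- instead of A's three full scans of the result list per element (objective: faster).
-- ===== PORT A =====
-- one iteration of A's for-loop body (min, index of min, conditional replace)
def findMaxNStep (result : List Int) (x : Int) : List Int :=
  match PySem.List.min? result (fun v => v) with
  | none => result          -- Python's min([]) raises ValueError here; excluded by Pre_
  | some smallest =>
      let minIndex := (PySem.List.index? result smallest).getD 0
      if x > smallest then result.set minIndex x else result

def findMaxN (n : Int) (someList : List Int) : List Int :=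
  (PySem.List.pyRange 0 someList.length 1).foldl
    (fun result i => findMaxNStep result (PySem.List.pyGetD someList i 0))
    (List.replicate n.toNat (-1))

-- ===== PORT B =====
-- Python tuple `<` on (value, slot) pairs (lexicographic)
def pairLT (p q : Int × Int) : Bool := p.1 < q.1 || (p.1 == q.1 && p.2 < q.2)

-- Source B's right-to-left while-loop, expressed on the reversed list: walk past the
-- entries q with q > p (i.e. pairLT p q), then put p down
def rinsert (p : Int × Int) : List (Int × Int) → List (Int × Int)
  | [] => [p]
  | q :: qs => if pairLT p q then q :: rinsert p qs else p :: q :: qs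

-- Source B's `while k > 0 and order[k-1] > (x, j): k -= 1; order.insert(k, (x, j))`:
-- scanning from the right end = rinsert on the reverse
def insertR (p : Int × Int) (l : List (Int × Int)) : List (Int × Int) :=
  (rinsert p l.reverse).reverse

-- Source B's loop body over the state (result, order); `order[0]` raises IndexError on an
-- empty order in Python (outside Pre_); the [] branch only totalises the function
def findMaxNBStep (st : List Int × List (Int × Int)) (x : Int) : List Int × List (Int × Int) :=
  match st.2 with
  | [] => st
  | (smallest, j) :: tail =>
      if x > smallest then (st.1.set j.toNat x, insertR (x, j) tail) else st

def findMaxN_alt (n : Int) (someList : List Int) : List Int :=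
  (someList.foldl findMaxNBStep
    (List.replicate n.toNat (-1),
     (List.range n.toNat).map (fun (i : Nat) => ((-1 : Int), (i : Int))))).1

-- ===== PRECONDITION & SPEC =====
-- Pre_ excludes n ≤ 0 with nonempty someList, where A's min([]) raises ValueError
-- (B's order[0] raises IndexError there too).
def Pre_findMaxN (n : Int) (someList : List Int) : Prop := someList = [] ∨ 1 ≤ n
instance (n : Int) (someList : List Int) : Decidable (Pre_findMaxN n someList) := by unfold Pre_findMaxN; infer_instance
def pvWitness_findMaxN : Int × List Int := (3, [5, 1, 7, 7, 2, 9])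

def Spec_findMaxN (n : Int) (someList : List Int) (out : List Int) : Prop := out = findMaxN_alt n someList
instance (n : Int) (someList : List Int) (out : List Int) : Decidable (Spec_findMaxN n someList out) := by unfold Spec_findMaxN; infer_instance

-- ===== CLAIM (what is proved, stated in full; the proofs are below) =====
def Claim_equal_findMaxN : Prop := ∀ (n : Int) (someList : List Int), Dom_findMaxN n someList → Pre_findMaxN n someList → Spec_findMaxN n someList (findMaxN n someList)

-- ===== LEMMAS AND PROOFS =====

-- proof-side left-to-right sorted insert; insertR coincides with it on a sorted
-- list containing no element equal to p (insertR_eq_insertPair below)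
def insertPair (p : Int × Int) : List (Int × Int) → List (Int × Int)
  | [] => [p]
  | q :: qs => if pairLT q p then q :: insertPair p qs else p :: q :: qs

-- enumerate result as (value, index) pairs, index starting at s
def enumP : List Int → Nat → List (Int × Int)
  | [], _ => []
  | v :: t, s => (v, (s : Int)) :: enumP t (s + 1)

-- strict lexicographic order on (value, index)
def lexLT (p q : Int × Int) : Prop := p.1 < q.1 ∨ (p.1 = q.1 ∧ p.2 < q.2)

-- loop invariant: B's side list is a sorted permutation of the enumerated result
def PoolInv (pool : List (Int × Int)) (result : List Int) : Prop :=
  pool.Perm (enumP result 0) ∧ pool.Pairwise lexLT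

theorem length_enumP (l : List Int) (s : Nat) : (enumP l s).length = l.length := by
  induction l generalizing s with
  | nil => rfl
  | cons v t ih => simp [enumP, ih]

theorem enumP_eq_nil_iff (l : List Int) (s : Nat) : enumP l s = [] ↔ l = [] := by
  cases l <;> simp [enumP]

theorem mem_enumP (l : List Int) (s : Nat) (p : Int × Int) :
    p ∈ enumP l s ↔ ∃ (k : Nat) (h : k < l.length), p = (l[k], ((s + k : Nat) : Int)) := by
  induction l generalizing s with
  | nil => simp [enumP]
  | cons v t ih =>
    simp only [enumP, List.mem_cons, ih]
    constructor
    · rintro (rfl | ⟨k, hk, rfl⟩)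
      · exact ⟨0, by simp, by simp⟩
      · exact ⟨k + 1, by simpa using hk, by simp; omega⟩
    · rintro ⟨k, hk, rfl⟩
      cases k with
      | zero => left; simp
      | succ k =>
        right
        exact ⟨k, by simpa using hk, by simp; omega⟩

theorem getElem_enumP (l : List Int) (s : Nat) (k : Nat) (h : k < l.length) :
    (enumP l s)[k]'(by rw [length_enumP]; exact h) = (l[k], ((s + k : Nat) : Int)) := by
  induction l generalizing s k with
  | nil => simp at h
  | cons v t ih =>
    cases k with
    | zero => simp [enumP]
    | succ k =>
      have := ih (s + 1) k (by simpa using h)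
      simp only [enumP, List.getElem_cons_succ, this]
      rw [show s + 1 + k = s + (k + 1) from by omega]

theorem enumP_set (l : List Int) (k : Nat) (x : Int) (s : Nat) :
    enumP (l.set k x) s = (enumP l s).set k (x, ((s + k : Nat) : Int)) := by
  induction l generalizing k s with
  | nil => simp [enumP]
  | cons v t ih =>
    cases k with
    | zero => simp [enumP]
    | succ k =>
      simp only [List.set_cons_succ, enumP, ih]
      rw [show s + 1 + k = s + (k + 1) from by omega]

-- totality / transitivity of the pair order
theorem lexLT_of_pairLT {q p : Int × Int} (h : pairLT q p = true) : lexLT q p := by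
  rcases q with ⟨a, b⟩; rcases p with ⟨c, d⟩
  simp only [pairLT, Bool.or_eq_true, Bool.and_eq_true, decide_eq_true_eq, beq_iff_eq] at h
  simp only [lexLT]
  tauto

theorem lexLT_of_not_pairLT {q p : Int × Int} (h : pairLT q p = false) (hne : q ≠ p) :
    lexLT p q := by
  rcases q with ⟨a, b⟩; rcases p with ⟨c, d⟩
  simp only [pairLT, Bool.or_eq_false_iff, Bool.and_eq_false_iff, decide_eq_false_iff_not,
    beq_eq_false_iff_ne, ne_eq] at h
  simp only [lexLT, ne_eq, Prod.mk.injEq, not_and] at *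
  omega

theorem lexLT_trans {p q r : Int × Int} (h1 : lexLT p q) (h2 : lexLT q r) : lexLT p r := by
  rcases p with ⟨a, b⟩; rcases q with ⟨c, d⟩; rcases r with ⟨e, f⟩
  simp only [lexLT] at *
  omega

theorem pairLT_iff (q p : Int × Int) : pairLT q p = true ↔ lexLT q p := by
  rcases q with ⟨a, b⟩; rcases p with ⟨c, d⟩
  simp only [pairLT, lexLT, Bool.or_eq_true, Bool.and_eq_true, decide_eq_true_eq, beq_iff_eq]

theorem lexLT_irrefl (p : Int × Int) : ¬ lexLT p p := by
  rcases p with ⟨a, b⟩; simp [lexLT]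

theorem pairLT_total {q p : Int × Int} (hne : q ≠ p) (h : pairLT q p = false) :
    pairLT p q = true := by
  rcases q with ⟨a, b⟩; rcases p with ⟨c, d⟩
  simp only [pairLT, Bool.or_eq_false_iff, Bool.and_eq_false_iff, decide_eq_false_iff_not,
    beq_eq_false_iff_ne, ne_eq] at h
  simp only [ne_eq, Prod.mk.injEq, not_and] at hne
  simp only [pairLT, Bool.or_eq_true, Bool.and_eq_true, decide_eq_true_eq, beq_iff_eq]
  omega

theorem rinsert_append (p : Int × Int) (A B : List (Int × Int)) :
    rinsert p (A ++ B) =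
      if A.all (fun q => pairLT p q) then A ++ rinsert p B else rinsert p A ++ B := by
  induction A with
  | nil => simp
  | cons q qs ih =>
    by_cases hq : pairLT p q = true
    · simp only [List.cons_append, rinsert, hq, if_true, ih, List.all_cons, Bool.true_and]
      split <;> simp
    · simp [rinsert, hq]

theorem insertR_eq_insertPair (p : Int × Int) (l : List (Int × Int))
    (hs : l.Pairwise lexLT) (hne : ∀ q ∈ l, q ≠ p) :
    insertR p l = insertPair p l := by
  induction l with
  | nil => simp [insertR, rinsert, insertPair]
  | cons x xs ih =>
    rcases List.pairwise_cons.1 hs with ⟨hx, hxs⟩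
    have hnex : ∀ q ∈ xs, q ≠ p := fun q hq => hne q (List.mem_cons_of_mem x hq)
    unfold insertR
    rw [List.reverse_cons, rinsert_append]
    by_cases hall : (xs.reverse.all (fun q => pairLT p q)) = true
    · rw [if_pos hall]
      have hall' : ∀ q ∈ xs, pairLT p q = true := by
        intro q hq; exact List.all_eq_true.1 hall q (List.mem_reverse.2 hq)
      by_cases hgx : pairLT p x = true
      · -- p goes below everything: p :: x :: xs on both sides
        have hfx : pairLT x p = false := by
          by_contra hb
          have hb' : pairLT x p = true := by
            cases hc : pairLT x p with
            | false => exact absurd hc hb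
            | true => rfl
          exact lexLT_irrefl x
            (lexLT_trans ((pairLT_iff _ _).1 hb') ((pairLT_iff _ _).1 hgx))
        simp [rinsert, hgx, insertPair, hfx]
      · -- x < p and every element of xs is > p: x :: p :: xs on both sides
        have hgx' : pairLT p x = false := by
          cases hc : pairLT p x with
          | false => rfl
          | true => exact absurd hc hgx
        have hfx : pairLT x p = true :=
          pairLT_total (Ne.symm (hne x List.mem_cons_self)) hgx'
        have hxs0 : insertPair p xs = p :: xs := by
          cases xs with
          | nil => rfl
          | cons y ys =>
            have hfy : pairLT y p = false := by
              by_contra hb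
              have hb' : pairLT y p = true := by
                cases hc : pairLT y p with
                | false => exact absurd hc hb
                | true => rfl
              exact lexLT_irrefl p
                (lexLT_trans ((pairLT_iff _ _).1 (hall' y List.mem_cons_self))
                  ((pairLT_iff _ _).1 hb'))
            simp [insertPair, hfy]
        simp [rinsert, hgx, insertPair, hfx, hxs0]
    · -- some element of xs is < p: x stays in front, recurse
      rw [if_neg hall, List.reverse_append]
      have hfx : pairLT x p = true := by
        obtain ⟨q, hqmem, hq2⟩ : ∃ q ∈ xs, pairLT p q = false := by
          simpa using List.all_eq_true.not.1 hall
        have hqlt : lexLT q p := (pairLT_iff _ _).1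
          (pairLT_total (Ne.symm (hnex q hqmem)) hq2)
        exact (pairLT_iff _ _).2 (lexLT_trans (hx q hqmem) hqlt)
      have := ih hxs hnex
      unfold insertR at this
      simp [insertPair, hfx, this]

theorem perm_insertPair (p : Int × Int) (l : List (Int × Int)) :
    (insertPair p l).Perm (p :: l) := by
  induction l with
  | nil => exact List.Perm.refl _
  | cons q qs ih =>
    simp only [insertPair]
    split
    · exact (ih.cons q).trans (List.Perm.swap p q qs)
    · exact List.Perm.refl _

theorem pairwise_insertPair {p : Int × Int} {l : List (Int × Int)}
    (hs : l.Pairwise lexLT) (hne : ∀ q ∈ l, q ≠ p) :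
    (insertPair p l).Pairwise lexLT := by
  induction l with
  | nil => simp [insertPair]
  | cons q qs ih =>
    rcases List.pairwise_cons.1 hs with ⟨hq, hqs⟩
    simp only [insertPair]
    split
    · rename_i hlt
      refine List.pairwise_cons.2 ⟨?_, ih hqs (fun r hr => hne r (List.mem_cons_of_mem q hr))⟩
      intro r hr
      rcases List.mem_cons.1 ((perm_insertPair p qs).mem_iff.1 hr) with rfl | hr2
      · exact lexLT_of_pairLT hlt
      · exact hq r hr2
    · rename_i hlt
      have hpq : lexLT p q :=
        lexLT_of_not_pairLT (Bool.of_not_eq_true hlt) (hne q List.mem_cons_self)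
      refine List.pairwise_cons.2 ⟨?_, hs⟩
      intro r hr
      rcases List.mem_cons.1 hr with rfl | hr
      · exact hpq
      · exact lexLT_trans hpq (hq r hr)

-- the first index at which v occurs
theorem index?_of_first (l : List Int) (v : Int) (k : Nat) (hk : k < l.length)
    (hv : l[k] = v) (hmin : ∀ j (hj : j < k), l[j]'(by omega) ≠ v) :
    PySem.List.index? l v = some k := by
  induction l generalizing k with
  | nil => simp at hk
  | cons a t ih =>
    cases k with
    | zero =>
      simp only [List.getElem_cons_zero] at hv
      subst hv
      exact PySem.List.index?_cons_self a t
    | succ k =>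
      have ha : a ≠ v := by
        have := hmin 0 (by omega)
        simpa using this
      rw [PySem.List.index?_cons_of_ne t ha]
      rw [ih k (by simpa using hk) (by simpa using hv)
        (fun j hj => by simpa using hmin (j + 1) (by omega))]
      rfl

-- head of the sorted pool = (min of result, leftmost index of that min)
theorem head_facts {v i : Int} {rest : List (Int × Int)} {result : List Int}
    (hperm : ((v, i) :: rest).Perm (enumP result 0))
    (hsort : ((v, i) :: rest).Pairwise lexLT) :
    ∃ (k : Nat) (hk : k < result.length), i = (k : Int) ∧ result[k] = v ∧
      PySem.List.min? result (fun y => y) = some v ∧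
      PySem.List.index? result v = some k := by
  have hmemh : (v, i) ∈ enumP result 0 := hperm.mem_iff.1 List.mem_cons_self
  rcases (mem_enumP result 0 _).1 hmemh with ⟨k, hk, hpair⟩
  have hv : result[k] = v := by simpa using congrArg Prod.fst hpair.symm
  have hi : i = (k : Int) := by simpa using congrArg Prod.snd hpair
  have hhd := List.pairwise_cons.1 hsort |>.1
  -- v is ≤ every element of result
  have hle : ∀ y ∈ result, v ≤ y := by
    intro y hy
    rcases List.getElem_of_mem hy with ⟨j, hj, rfl⟩
    have : (result[j], ((j : Nat) : Int)) ∈ enumP result 0 :=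
      (mem_enumP result 0 _).2 ⟨j, hj, by simp⟩
    rcases List.mem_cons.1 (hperm.symm.mem_iff.1 this) with heq | hmem
    · have := congrArg Prod.fst heq
      simp at this; omega
    · rcases hhd _ hmem with h | ⟨h, _⟩
      · exact le_of_lt h
      · have h' : v = result[j] := h
        exact le_of_eq h'
  have hvmem : v ∈ result := hv ▸ List.getElem_mem hk
  -- min? result = some v
  have hmin : PySem.List.min? result (fun y => y) = some v := by
    rcases hm : PySem.List.min? result (fun y => y) with _ | m
    · rw [PySem.List.min?_eq_none_iff] at hm
      subst hm; simp at hvmem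
    · have h1 : v ≤ m := hle m (PySem.List.min?_mem hm)
      have h2 : m ≤ v := PySem.List.min?_isMin hm v hvmem
      rw [le_antisymm h2 h1]
  -- no earlier occurrence of v
  have hfirst : ∀ j (hj : j < k), result[j]'(by omega) ≠ v := by
    intro j hj hjv
    have hjmem : (v, ((j : Nat) : Int)) ∈ enumP result 0 :=
      (mem_enumP result 0 _).2 ⟨j, by omega, by simp [hjv]⟩
    rcases List.mem_cons.1 (hperm.symm.mem_iff.1 hjmem) with heq | hmem
    · have := congrArg Prod.snd heq
      simp [hi] at this; omega
    · rcases hhd _ hmem with h | ⟨_, h⟩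
      · simp at h
      · rw [hi] at h; simp at h; omega
  exact ⟨k, hk, hi, hv, hmin, index?_of_first result v k hk hv hfirst⟩

-- one step: B's state stays coupled to A's result
theorem step_inv {st : List Int × List (Int × Int)} (x : Int)
    (h : PoolInv st.2 st.1) :
    (findMaxNBStep st x).1 = findMaxNStep st.1 x ∧
      PoolInv (findMaxNBStep st x).2 (findMaxNBStep st x).1 := by
  rcases st with ⟨result, pool⟩
  rcases h with ⟨hperm, hsort⟩
  match pool, hperm, hsort with
  | [], hperm, hsort =>
    have : result = [] := by
      have := hperm.symm.eq_nil
      exact (enumP_eq_nil_iff result 0).1 this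
    subst this
    refine ⟨by simp [findMaxNBStep, findMaxNStep, PySem.List.min?], ?_⟩
    exact ⟨hperm, hsort⟩
  | (v, i) :: rest, hperm, hsort =>
    rcases head_facts hperm hsort with ⟨k, hk, hi, hv, hmin, hidx⟩
    have hrest_sort : rest.Pairwise lexLT := (List.pairwise_cons.1 hsort).2
    have hA : findMaxNStep result x = if x > v then result.set k x else result := by
      simp only [findMaxNStep, hmin, hidx, Option.getD_some]
    by_cases hx : x > v
    · -- replacement happens on both sides
      have hne : ∀ q ∈ rest, q ≠ (x, i) := by
        intro q hq hqp
        have hqE : q ∈ enumP result 0 :=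
          hperm.mem_iff.1 (List.mem_cons_of_mem _ hq)
        rcases (mem_enumP result 0 q).1 hqE with ⟨k', hk', hq'⟩
        subst hqp
        have h1 := congrArg Prod.snd hq'
        simp [hi] at h1
        subst h1
        have h2 := congrArg Prod.fst hq'
        simp [hv] at h2
        omega
      have hB1 : (findMaxNBStep (result, (v, i) :: rest) x).1 = result.set i.toNat x := by
        simp [findMaxNBStep, hx]
      have hB2 : (findMaxNBStep (result, (v, i) :: rest) x).2 = insertPair (x, i) rest := by
        simp only [findMaxNBStep, if_pos hx]
        exact insertR_eq_insertPair (x, i) rest hrest_sort hne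
      have hiN : i.toNat = k := by rw [hi]; simp
      refine ⟨by rw [hB1, hA, if_pos hx, hiN], ?_⟩
      rw [hB1, hB2, hiN]
      have hkE : k < (enumP result 0).length := by rw [length_enumP]; exact hk
      have hEk : (enumP result 0)[k]'hkE = (v, i) := by
        rw [getElem_enumP result 0 k hk]; rw [hv, hi]; simp
      have h1 : ((v, i) :: (enumP result 0).eraseIdx k).Perm (enumP result 0) := by
        have := List.getElem_cons_eraseIdx_perm (l := enumP result 0) hkE
        rwa [hEk] at this
      have hrest : rest.Perm ((enumP result 0).eraseIdx k) :=
        ((hperm.trans h1.symm).cons_inv)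
      constructor
      · -- permutation part
        refine (perm_insertPair (x, i) rest).trans ?_
        refine ((hrest.cons (x, i)).trans ?_)
        have h2 : ((enumP result 0).set k (x, i)).Perm
            ((x, i) :: (enumP result 0).eraseIdx k) :=
          List.set_perm_cons_eraseIdx hkE (x, i)
        have h3 : enumP (result.set k x) 0 = (enumP result 0).set k (x, i) := by
          rw [enumP_set result k x 0, hi]; simp
        rw [h3]
        exact h2.symm
      · -- sortedness part
        exact pairwise_insertPair hrest_sort hne
    · -- no replacement on either side
      have hB : findMaxNBStep (result, (v, i) :: rest) x = (result, (v, i) :: rest) := by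
        simp [findMaxNBStep, hx]
      rw [hB, hA, if_neg hx]
      exact ⟨rfl, hperm, hsort⟩

theorem fold_inv (xs : List Int) :
    ∀ (st : List Int × List (Int × Int)), PoolInv st.2 st.1 →
      (xs.foldl findMaxNBStep st).1 = xs.foldl findMaxNStep st.1 := by
  induction xs with
  | nil => intro st _; rfl
  | cons x t ih =>
    intro st h
    rcases step_inv x h with ⟨h1, h2⟩
    simp only [List.foldl_cons]
    rw [ih _ h2, h1]

theorem enumP_replicate (c : Int) (m : Nat) :
    ∀ s : Nat, enumP (List.replicate m c) s =
      (List.range m).map (fun k => (c, ((s + k : Nat) : Int))) := by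
  induction m with
  | zero => intro s; rfl
  | succ j ih =>
    intro s
    rw [List.replicate_succ, List.range_succ_eq_map]
    simp only [enumP, ih (s + 1), List.map_cons, List.map_map]
    refine congrArg₂ List.cons (by simp) ?_
    apply List.map_congr_left
    intro k hk
    simp only [Function.comp_apply, Nat.succ_eq_add_one]
    rw [show s + 1 + k = s + (k + 1) from by omega]

theorem init_inv (m : Nat) :
    PoolInv ((List.range m).map (fun (i : Nat) => ((-1 : Int), (i : Int)))) (List.replicate m (-1)) := by
  constructor
  · rw [enumP_replicate (-1) m 0]
    simp
  · refine List.Pairwise.map _ (fun a b hab => ?_) List.pairwise_lt_range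
    exact Or.inr ⟨rfl, by omega⟩

-- ===== VERDICT (by name: the statement is the Claim_ definition above) =====

theorem findMaxN_spec : Claim_equal_findMaxN := by
  intro n someList _ _
  show findMaxN n someList = findMaxN_alt n someList
  have hA : findMaxN n someList =
      someList.foldl findMaxNStep (List.replicate n.toNat (-1)) := by
    unfold findMaxN
    rw [← PySem.List.len_eq someList]
    exact PySem.List.foldl_pyRange_zero_pyGetD someList 0 findMaxNStep _
  rw [hA]
  unfold findMaxN_alt
  exact (fold_inv someList (List.replicate n.toNat (-1), (List.range n.toNat).map (fun (i : Nat) => ((-1 : Int), (i : Int)))) (init_inv n.toNat)).symm
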